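-- pv_equiv track=rewrite | github.com/keifukumori/figma_img | tools/normalize_class_order.py | normalize_attr
-- ===== SOURCE A (Python) =====
-- from typing import List
--
-- ORDER_GROUPS = [
--     # structural anchors
--     lambda c: c in {'frame','container','inner','content-width-container','card-surface'},
--     lambda c: c.startswith('frame-'),
--     # layout
--     lambda c: c in {'layout-2col','layout-flex-row','layout-2col-equal','layout-image-text','layout-text-image'},
--     # utilities (u-)
--     lambda c: c.startswith('u-'),
--     # typography bundles / tokens
--     lambda c: c.startswith('tx-'),
--     lambda c: c.startswith('t-'),
--     lambda c: c.startswith('tw-') or c.startswith('lhpx-') or c.startswith('lhr-') or c.startswith('lhp-') or c.startswith('ta-') or c.startswith('ls-'),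
--     # visuals
--     lambda c: c.startswith('vis-grad-') or c.startswith('visg-'),
--     lambda c: c.startswith('vis-'),
--     # remaining named classes
--     lambda c: c in {'btn','btn--secondary','oswald'},
--     # legacy fallbacks
--     lambda c: c.startswith('u-sign-'),
--     lambda c: c.startswith('v-'),
--     lambda c: c.startswith('n-'),
-- ]
--
-- def rank(cls: str) -> int:
--     for i, pred in enumerate(ORDER_GROUPS):
--         try:
--             if pred(cls):
--                 return i
--         except Exception:
--             continue
--     return len(ORDER_GROUPS)
--
-- def normalize_attr(classes: str) -> str:
--     arr = [c for c in classes.split() if c]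
--     # drop duplicates, keep first occurrence
--     seen = set()
--     unique: List[str] = []
--     for c in arr:
--         if c == 'ls-0':
--             continue
--         if c in seen:
--             continue
--         seen.add(c)
--         unique.append(c)
--     # stable sort by group rank, keep inner order within same rank
--     grouped: List[List[str]] = []
--     for _ in range(len(ORDER_GROUPS)+1):
--         grouped.append([])
--     for c in unique:
--         grouped[rank(c)].append(c)
--     out: List[str] = []
--     for g in grouped:
--         out.extend(g)
--     return ' '.join(out)
-- ===== SOURCE B (Python) =====
-- def rank(cls: str) -> int:
--     # direct decision chain, same order as A's ORDER_GROUPS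
--     if cls in {'frame','container','inner','content-width-container','card-surface'}:
--         return 0
--     if cls.startswith('frame-'):
--         return 1
--     if cls in {'layout-2col','layout-flex-row','layout-2col-equal','layout-image-text','layout-text-image'}:
--         return 2
--     if cls.startswith('u-'):
--         return 3
--     if cls.startswith('tx-'):
--         return 4
--     if cls.startswith('t-'):
--         return 5
--     if cls.startswith(('tw-','lhpx-','lhr-','lhp-','ta-','ls-')):
--         return 6
--     if cls.startswith(('vis-grad-','visg-')):
--         return 7
--     if cls.startswith('vis-'):
--         return 8
--     if cls in {'btn','btn--secondary','oswald'}: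
--         return 9
--     if cls.startswith('u-sign-'):
--         return 10
--     if cls.startswith('v-'):
--         return 11
--     if cls.startswith('n-'):
--         return 12
--     return 13
--
-- def normalize_attr(classes: str) -> str:
--     unique = list(dict.fromkeys(c for c in classes.split() if c and c != 'ls-0'))
--     # rank-major selection: for each rank in order, emit the classes of that rank
--     return ' '.join(c for r in range(14) for c in unique if rank(c) == r)
-- ===== Notes on version B (the rewrite author's own statement) =====
-- stated objective: simpler
-- what changed: Dedup collapses to dict.fromkeys over a filtering generator; the lambda-table rank loop becomes a direct if-chain returning the group index; and A's bucket scaffolding (allocate 15 lists, append by rank, concatenate) is replaced by a rank-major selection comprehension that re-scans the unique list once per rank.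
import Mathlib
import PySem

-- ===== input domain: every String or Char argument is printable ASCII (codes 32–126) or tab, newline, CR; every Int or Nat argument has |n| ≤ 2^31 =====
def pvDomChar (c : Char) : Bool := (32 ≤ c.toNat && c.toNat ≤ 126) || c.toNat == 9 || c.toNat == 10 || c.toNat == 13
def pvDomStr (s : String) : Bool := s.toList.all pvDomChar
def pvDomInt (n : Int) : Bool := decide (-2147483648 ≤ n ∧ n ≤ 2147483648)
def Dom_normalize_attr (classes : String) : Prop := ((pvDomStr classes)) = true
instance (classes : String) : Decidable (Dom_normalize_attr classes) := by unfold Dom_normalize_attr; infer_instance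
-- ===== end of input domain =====

-- B (simpler): dict.fromkeys dedup, a direct if-chain rank, and a rank-major
-- selection comprehension instead of A's allocate/append/concatenate buckets.

-- ===== PORT A =====
def ORDER_GROUPS : List (String → Bool) :=
  [ fun c => c == "frame" || c == "container" || c == "inner" || c == "content-width-container" || c == "card-surface",
    fun c => PySem.Str.startswith c "frame-",
    fun c => c == "layout-2col" || c == "layout-flex-row" || c == "layout-2col-equal" || c == "layout-image-text" || c == "layout-text-image",
    fun c => PySem.Str.startswith c "u-",
    fun c => PySem.Str.startswith c "tx-",
    fun c => PySem.Str.startswith c "t-",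
    fun c => PySem.Str.startswith c "tw-" || PySem.Str.startswith c "lhpx-" || PySem.Str.startswith c "lhr-" || PySem.Str.startswith c "lhp-" || PySem.Str.startswith c "ta-" || PySem.Str.startswith c "ls-",
    fun c => PySem.Str.startswith c "vis-grad-" || PySem.Str.startswith c "visg-",
    fun c => PySem.Str.startswith c "vis-",
    fun c => c == "btn" || c == "btn--secondary" || c == "oswald",
    fun c => PySem.Str.startswith c "u-sign-",
    fun c => PySem.Str.startswith c "v-",
    fun c => PySem.Str.startswith c "n-" ]

-- the enumerate loop of rank; the predicates are total, so A's try/except is dead code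
def rankAux : List (String → Bool) → Nat → String → Nat
  | [], i, _ => i
  | p :: ps, i, c => if p c then i else rankAux ps (i + 1) c

def rank (c : String) : Nat := rankAux ORDER_GROUPS 0 c

def normalize_attr (classes : String) : String :=
  let arr := (PySem.Str.split₀ classes).filter (fun c => c != "")
  let st := arr.foldl (fun (st : PySem.Set String × List String) c =>
      if c == "ls-0" then st
      else if PySem.Set.contains st.1 c then st
      else (PySem.Set.add st.1 c, st.2 ++ [c])) (PySem.Set.empty, [])
  let unique := st.2
  let grouped := (PySem.List.pyRange 0 ((ORDER_GROUPS.length : Int) + 1) 1).foldl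
      (fun g _ => g ++ [([] : List String)]) []
  let grouped := unique.foldl (fun g c => g.set (rank c) (g.getD (rank c) [] ++ [c])) grouped
  let out : List String := grouped.foldl (fun acc g => acc ++ g) []
  PySem.Str.join " " out

-- ===== PORT B =====
-- rank as a direct decision chain (same group order as A's lambda table)
def rankB (c : String) : Nat :=
  if c == "frame" || c == "container" || c == "inner" || c == "content-width-container" || c == "card-surface" then 0
  else if PySem.Str.startswith c "frame-" then 1
  else if c == "layout-2col" || c == "layout-flex-row" || c == "layout-2col-equal" || c == "layout-image-text" || c == "layout-text-image" then 2
  else if PySem.Str.startswith c "u-" then 3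
  else if PySem.Str.startswith c "tx-" then 4
  else if PySem.Str.startswith c "t-" then 5
  else if PySem.Str.startswith c "tw-" || PySem.Str.startswith c "lhpx-" || PySem.Str.startswith c "lhr-" || PySem.Str.startswith c "lhp-" || PySem.Str.startswith c "ta-" || PySem.Str.startswith c "ls-" then 6
  else if PySem.Str.startswith c "vis-grad-" || PySem.Str.startswith c "visg-" then 7
  else if PySem.Str.startswith c "vis-" then 8
  else if c == "btn" || c == "btn--secondary" || c == "oswald" then 9
  else if PySem.Str.startswith c "u-sign-" then 10
  else if PySem.Str.startswith c "v-" then 11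
  else if PySem.Str.startswith c "n-" then 12
  else 13

def normalize_attr_alt (classes : String) : String :=
  let unique := PySem.List.dedup ((PySem.Str.split₀ classes).filter (fun c => c != "" && c != "ls-0"))
  -- ' '.join(c for r in range(14) for c in unique if rank(c) == r)
  PySem.Str.join " "
    (((PySem.List.pyRange 0 14 1).map
        (fun r => unique.filter (fun c => ((rankB c : Int) == r)))).flatten)

-- ===== PRECONDITION & SPEC =====
def Spec_normalize_attr (classes : String) (out : String) : Prop := out = normalize_attr_alt classes
instance (classes : String) (out : String) : Decidable (Spec_normalize_attr classes out) := by unfold Spec_normalize_attr; infer_instance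

-- ===== CLAIM =====
def Claim_equal_normalize_attr : Prop := ∀ (classes : String), Dom_normalize_attr classes → Spec_normalize_attr classes (normalize_attr classes)

-- ===== LEMMAS AND PROOFS =====

-- B's decision chain computes A's table-driven rank
theorem rankB_eq_rank (c : String) : rankB c = rank c := rfl

-- rank never exceeds the bucket range
theorem rankAux_lt (ps : List (String → Bool)) : ∀ (i : Nat) (c : String), rankAux ps i c < i + ps.length + 1 := by
  induction ps with
  | nil => intro i c; simp [rankAux]
  | cons p ps ih =>
      intro i c
      simp only [rankAux]
      split
      · simp only [List.length_cons]; omega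
      · have := ih (i + 1) c; simp only [List.length_cons]; omega

theorem rank_lt (c : String) : rank c < 14 := by
  have h := rankAux_lt ORDER_GROUPS 0 c
  have h13 : ORDER_GROUPS.length = 13 := rfl
  rw [h13] at h
  simpa [rank] using h

-- A's seen/unique loop: both components stay equal, and the result is the
-- ordered dedup (Set.update) of the ls-0-filtered input
theorem loopA (xs : List String) : ∀ (u : List String),
    xs.foldl (fun (st : PySem.Set String × List String) c =>
      if c == "ls-0" then st
      else if PySem.Set.contains st.1 c then st
      else (PySem.Set.add st.1 c, st.2 ++ [c])) (u, u)
    = (PySem.Set.update u (xs.filter (fun c => c != "ls-0")),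
       PySem.Set.update u (xs.filter (fun c => c != "ls-0"))) := by
  induction xs with
  | nil => intro u; simp [PySem.Set.update]
  | cons c xs ih =>
      intro u
      rw [List.foldl_cons, List.filter_cons]
      by_cases h0 : c = "ls-0"
      · rw [if_pos (show (c == "ls-0") = true by simp [h0]),
            if_neg (show ¬ (c != "ls-0") = true by simp [h0])]
        exact ih u
      · rw [if_neg (show ¬ (c == "ls-0") = true by simp [h0]),
            if_pos (show (c != "ls-0") = true by simp [h0])]
        by_cases hm : c ∈ u
        · have hcb : PySem.Set.contains u c = true := by simpa [PySem.Set.contains] using hm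
          have hadd : PySem.Set.add u c = u := by unfold PySem.Set.add; rw [hcb]; simp
          rw [if_pos hcb, ih u]
          simp [PySem.Set.update, hadd]
        · have hcb : PySem.Set.contains u c = false := by simpa [PySem.Set.contains] using hm
          have hadd : PySem.Set.add u c = u ++ [c] := by unfold PySem.Set.add; rw [hcb]; simp
          rw [if_neg (by rw [hcb]; simp), hadd, ih (u ++ [c])]
          simp [PySem.Set.update, hadd]

-- A's bucket-filling loop computes, per index, the filter by rank
theorem bucket_fold (key : String → Nat) (xs : List String) : ∀ (g : List (List String)),
    (∀ c ∈ xs, key c < g.length) →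
    xs.foldl (fun g c => g.set (key c) (g.getD (key c) [] ++ [c])) g
    = (List.range g.length).map (fun i => g.getD i [] ++ xs.filter (fun c => key c == i)) := by
  induction xs with
  | nil =>
      intro g _
      apply List.ext_getElem
      · simp
      · intro i h1 h2
        simp only [List.foldl_nil] at h1 ⊢
        simp [List.getD_eq_getElem?_getD, List.getElem?_eq_getElem h1]
  | cons c xs ih =>
      intro g hlt
      have hk : key c < g.length := hlt c (by simp)
      have hlen : (g.set (key c) (g.getD (key c) [] ++ [c])).length = g.length := by simp
      rw [List.foldl_cons, ih _ (by intro d hd; rw [hlen]; exact hlt d (by simp [hd]))]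
      rw [hlen]
      apply List.map_congr_left
      intro i hi
      have hi' : i < g.length := List.mem_range.mp hi
      by_cases hik : i = key c
      · subst hik
        simp [List.getD_eq_getElem?_getD, List.getElem?_set_self hk]
      · have : (g.set (key c) (g.getD (key c) [] ++ [c]))[i]? = g[i]? :=
          List.getElem?_set_ne (by omega)
        rw [List.getD_eq_getElem?_getD, this, ← List.getD_eq_getElem?_getD]
        simp [Ne.symm hik]

-- B's Int-indexed range comprehension is the Nat-indexed rank partition
theorem alt_partition (u : List String) :
    ((PySem.List.pyRange 0 14 1).map
        (fun r => u.filter (fun c => ((rankB c : Int) == r)))).flatten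
    = ((List.range 14).map (fun i => u.filter (fun c => rank c == i))).flatten := by
  have hpr : PySem.List.pyRange 0 14 1 = (List.range 14).map Int.ofNat := by decide
  rw [hpr, List.map_map]
  congr 1
  apply List.map_congr_left
  intro i _
  simp only [Function.comp]
  apply List.filter_congr
  intro c _
  rw [rankB_eq_rank]
  simp

-- ===== VERDICT (by name: the statement is the Claim_ definition above) =====
theorem normalize_attr_spec : Claim_equal_normalize_attr := by
  intro classes _
  unfold Spec_normalize_attr normalize_attr normalize_attr_alt
  dsimp only
  have hfilters :
      ((PySem.Str.split₀ classes).filter (fun c => c != "")).filter (fun c => c != "ls-0")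
      = (PySem.Str.split₀ classes).filter (fun c => c != "" && c != "ls-0") := by
    rw [List.filter_filter]
    congr 1
    funext a
    exact Bool.and_comm _ _
  have hempty : (PySem.Set.empty : PySem.Set String) = [] := rfl
  have hdedup := loopA ((PySem.Str.split₀ classes).filter (fun c => c != "")) []
  set uniq := PySem.List.dedup ((PySem.Str.split₀ classes).filter (fun c => c != "" && c != "ls-0")) with huniq
  have huA : (((PySem.Str.split₀ classes).filter (fun c => c != "")).foldl
      (fun (st : PySem.Set String × List String) c =>
        if c == "ls-0" then st
        else if PySem.Set.contains st.1 c then st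
        else (PySem.Set.add st.1 c, st.2 ++ [c])) (PySem.Set.empty, [])).2 = uniq := by
    rw [hempty, hdedup, hfilters]
    rfl
  rw [huA]
  have hinit : (PySem.List.pyRange 0 ((ORDER_GROUPS.length : Int) + 1) 1).foldl
      (fun g _ => g ++ [([] : List String)]) [] = List.replicate 14 ([] : List String) := by rfl
  rw [hinit]
  rw [bucket_fold rank uniq (List.replicate 14 []) (by intro c _; simpa using rank_lt c)]
  rw [PySem.List.foldl_append_eq_flatten]
  rw [alt_partition uniq]
  simp only [List.length_replicate, List.nil_append]
  have hrepl : ∀ i ∈ List.range 14,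
      (List.replicate 14 ([] : List String)).getD i [] ++ uniq.filter (fun c => rank c == i)
      = uniq.filter (fun c => rank c == i) := by
    intro i hi
    have h14 : i < 14 := List.mem_range.mp hi
    rw [List.getD_eq_getElem?_getD, List.getElem?_replicate, if_pos h14]
    simp
  rw [List.map_congr_left hrepl]
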